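-- pv_equiv track=rewrite | github.com/SilverCopper/Rosalind_answer | BA1/BA1M.py | trans_num_to_seq
-- ===== SOURCE A (Python) =====
-- def trans_num_to_seq(num, seq_length):
--     dict = {
--         0: "A",
--         1: "C",
--         2: "G",
--         3: "T"
--     }
--     result = []
--     while num // 4 != 0:
--         temp = num % 4
--         result.append(temp)
--         num = num // 4
--
--     result.append(num)
--     result.reverse()
--
--     seq = "".join([dict[i] for i in result])
--
--     seq = "A" * (seq_length - len(result)) + seq
--
--     return seq
-- ===== SOURCE B (Python) =====
-- def trans_num_to_seq(num, seq_length):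
--     # build most-significant-digit first: width = max(seq_length, base-4 digit count)
--     digits = 1
--     while num >= 4 ** digits:
--         digits += 1
--     width = max(seq_length, digits)
--     return "".join("ACGT"[(num >> (2 * k)) & 3] for k in range(width - 1, -1, -1))
-- ===== Notes on version B (the rewrite author's own statement) =====
-- stated objective: alternative
-- what changed: B computes the required width first (max of seq_length and the base-4 digit count) and emits the string most-significant-digit-first in one left-to-right pass, instead of A's collect-remainders list, reverse, dict-lookup join and separate padding prepend.
-- outside the precondition, e.g. on trans_num_to_seq(-5, 3): A does not finish within the time limit, B returns 'TGT'
import Mathlib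
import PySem

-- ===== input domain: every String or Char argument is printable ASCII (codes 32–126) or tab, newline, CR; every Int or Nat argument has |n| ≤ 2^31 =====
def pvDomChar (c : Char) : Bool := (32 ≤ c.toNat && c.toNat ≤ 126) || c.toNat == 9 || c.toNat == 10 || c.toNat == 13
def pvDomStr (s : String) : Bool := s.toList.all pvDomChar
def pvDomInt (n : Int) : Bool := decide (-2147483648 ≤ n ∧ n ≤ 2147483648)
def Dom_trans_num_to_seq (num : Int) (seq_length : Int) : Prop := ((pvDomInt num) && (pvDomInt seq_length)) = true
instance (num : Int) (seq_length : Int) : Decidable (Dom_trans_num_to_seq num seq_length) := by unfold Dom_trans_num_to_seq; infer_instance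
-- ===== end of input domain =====

-- B builds the string most-significant-digit-first from a computed width, instead of
-- collecting remainders, reversing and prepending padding (objective: alternative).


-- ===== PORT A =====
-- the dict {0:"A",1:"C",2:"G",3:"T"} (values as List Char, Str functions are defined on List Char)
def pvDictA : PySem.Dict Int (List Char) :=
  PySem.Dict.ofList [((0 : Int), ['A']), ((1 : Int), ['C']), ((2 : Int), ['G']), ((3 : Int), ['T'])]

-- the while loop: returns (final num, result list); fuel num.toNat+1 suffices on Pre_ (0 ≤ num)
def pvLoopA (fuel : Nat) (num : Int) (result : List Int) : Int × List Int :=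
  match fuel with
  | 0 => (num, result)
  | f + 1 =>
    if PySem.Int.floordiv num 4 ≠ 0 then
      pvLoopA f (PySem.Int.floordiv num 4) (result ++ [PySem.Int.mod num 4])
    else (num, result)

def trans_num_to_seq (num : Int) (seq_length : Int) : String :=
  let p := pvLoopA (num.toNat + 1) num []
  let result := (p.2 ++ [p.1]).reverse
  let seq := PySem.Chars.join [] (result.map (fun i => PySem.Dict.getD pvDictA i []))
  let seq := PySem.List.pyRepeat ['A'] (seq_length - (result.length : Int)) ++ seq
  String.ofList seq

-- ===== PORT B =====
-- the digit-count loop: while num >= 4 ** digits: digits += 1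
def pvCountB (fuel : Nat) (num : Int) (digits : Int) : Int :=
  match fuel with
  | 0 => digits
  | f + 1 =>
    if num ≥ (4 : Int) ^ digits.toNat then pvCountB f num (digits + 1) else digits

def trans_num_to_seq_alt (num : Int) (seq_length : Int) : String :=
  let digits := pvCountB (num.toNat + 1) num 1
  let width := max seq_length digits
  String.ofList (PySem.Chars.join []
    ((PySem.List.pyRange (width - 1) (-1) (-1)).map
      (fun k => [PySem.List.pyGetD ['A', 'C', 'G', 'T']
        (PySem.Int.band (num >>> (2 * k).toNat) 3) ' '])))

-- ===== PRECONDITION & SPEC =====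
-- Pre_ excludes num < 0, on which A's while loop never terminates (num // 4 stays -1).
def Pre_trans_num_to_seq (num : Int) (seq_length : Int) : Prop := 0 ≤ num
instance (num : Int) (seq_length : Int) : Decidable (Pre_trans_num_to_seq num seq_length) := by
  unfold Pre_trans_num_to_seq; infer_instance

def pvWitness_trans_num_to_seq : Int × Int := (11, 5)

def Spec_trans_num_to_seq (num : Int) (seq_length : Int) (out : String) : Prop := out = trans_num_to_seq_alt num seq_length
instance (num : Int) (seq_length : Int) (out : String) : Decidable (Spec_trans_num_to_seq num seq_length out) := by unfold Spec_trans_num_to_seq; infer_instance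

-- ===== CLAIM (what is proved, stated in full; the proofs are below) =====
def Claim_equal_trans_num_to_seq : Prop := ∀ (num : Int) (seq_length : Int), Dom_trans_num_to_seq num seq_length → Pre_trans_num_to_seq num seq_length → Spec_trans_num_to_seq num seq_length (trans_num_to_seq num seq_length)

-- ===== LEMMAS AND PROOFS =====

-- base-4 digits of n, least significant first (always nonempty)
def natDigits (n : Nat) : List Nat :=
  if h : n < 4 then [n] else n % 4 :: natDigits (n / 4)
decreasing_by exact Nat.div_lt_self (by omega) (by omega)

def pvChar (d : Nat) : Char := ['A', 'C', 'G', 'T'].getD d ' '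

lemma natDigits_length_pos (n : Nat) : 0 < (natDigits n).length := by
  unfold natDigits; split <;> simp

lemma natDigits_lt (n : Nat) : n < 4 ^ (natDigits n).length := by
  induction n using Nat.strong_induction_on with
  | _ n ih =>
    unfold natDigits
    split
    · simpa
    · rename_i h
      have ih' := ih (n / 4) (Nat.div_lt_self (by omega) (by omega))
      simp only [List.length_cons, pow_succ]
      omega

lemma natDigits_length_le (n d : Nat) (hd : 1 ≤ d) (h : n < 4 ^ d) :
    (natDigits n).length ≤ d := by
  induction n using Nat.strong_induction_on generalizing d with
  | _ n ih =>
    unfold natDigits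
    split
    · simpa
    · rename_i hn
      have hd1 : 2 ≤ d := by
        by_contra hc
        interval_cases d <;> omega
      have : n / 4 < 4 ^ (d - 1) := by
        have : 4 ^ d = 4 ^ (d - 1) * 4 := by
          rw [← pow_succ]; congr 1; omega
        omega
      have := ih (n / 4) (Nat.div_lt_self (by omega) (by omega)) (d - 1) (by omega) this
      simp only [List.length_cons]
      omega

lemma natDigits_mem_lt (n : Nat) : ∀ d ∈ natDigits n, d < 4 := by
  induction n using Nat.strong_induction_on with
  | _ n ih =>
    unfold natDigits
    split
    · rename_i h; simpa using h
    · rename_i h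
      intro d hd
      rcases List.mem_cons.mp hd with h1 | h2
      · omega
      · exact ih (n / 4) (Nat.div_lt_self (by omega) (by omega)) d h2

lemma natDigits_getElem (n k : Nat) (hk : k < (natDigits n).length) :
    (natDigits n)[k] = n / 4 ^ k % 4 := by
  induction n using Nat.strong_induction_on generalizing k with
  | _ n ih =>
    unfold natDigits at hk ⊢
    split at hk
    · rename_i h
      simp only [List.length_cons, List.length_nil] at hk
      have hk0 : k = 0 := by omega
      subst hk0
      simp only [dif_pos h, List.getElem_cons_zero, pow_zero, Nat.div_one]
      exact (Nat.mod_eq_of_lt h).symm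
    · rename_i h
      simp only [dif_neg h]
      match k with
      | 0 => simp
      | k + 1 =>
        simp only [List.length_cons] at hk
        simp only [List.getElem_cons_succ]
        rw [ih (n / 4) (Nat.div_lt_self (by omega) (by omega)) k (by omega)]
        rw [pow_succ']
        rw [Nat.div_div_eq_div_mul]

-- A's loop computes the base-4 digits (LSB first) appended to the accumulator
lemma pvLoopA_spec (fuel n : Nat) (acc : List Int) (h : n < fuel) :
    (pvLoopA fuel (n : Int) acc).2 ++ [(pvLoopA fuel (n : Int) acc).1] =
      acc ++ (natDigits n).map (Nat.cast) := by
  induction fuel generalizing n acc with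
  | zero => omega
  | succ f ih =>
    have hfd : PySem.Int.floordiv (n : Int) 4 = ((n / 4 : Nat) : Int) := by
      exact_mod_cast PySem.Int.floordiv_natCast n 4
    have hmd : PySem.Int.mod (n : Int) 4 = ((n % 4 : Nat) : Int) := by
      exact_mod_cast PySem.Int.mod_natCast n 4
    unfold pvLoopA
    rw [hfd, hmd]
    unfold natDigits
    by_cases h4 : n < 4
    · have hz : (n / 4 : Nat) = 0 := Nat.div_eq_of_lt h4
      simp [hz, h4]
    · have hne : ((n / 4 : Nat) : Int) ≠ 0 := Nat.cast_ne_zero.mpr (by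
        have := Nat.one_le_div_iff (show 0 < 4 by omega) |>.mpr (show 4 ≤ n by omega)
        omega)
      simp only [hne, ne_eq, not_false_eq_true, if_true, dif_neg h4]
      rw [ih (n / 4) (acc ++ [((n % 4 : Nat) : Int)]) (by
        have := Nat.div_lt_self (show 0 < n by omega) (show 1 < 4 by omega); omega)]
      simp

-- B's digit-count loop returns max digits (natDigits n).length
lemma pvCountB_spec (fuel n d : Nat) (hd : 1 ≤ d)
    (hf : (natDigits n).length ≤ fuel + d) :
    pvCountB fuel (n : Int) (d : Int) = ((max d (natDigits n).length : Nat) : Int) := by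
  induction fuel generalizing d with
  | zero =>
    have := natDigits_length_pos n
    have hle : (natDigits n).length ≤ d := by omega
    unfold pvCountB
    congr 1
    omega
  | succ f ih =>
    unfold pvCountB
    by_cases h : (n : Int) ≥ (4 : Int) ^ (d : Int).toNat
    · have hdn : (d : Int).toNat = d := Int.toNat_natCast d
      have hge : 4 ^ d ≤ n := by
        rw [hdn] at h
        exact_mod_cast h
      have hlt : d < (natDigits n).length := by
        by_contra hc
        have : n < 4 ^ d := lt_of_lt_of_le (natDigits_lt n)
          (Nat.pow_le_pow_right (by omega) (by omega))
        omega
      simp only [h, if_pos]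
      have : ((d : Int) + 1) = ((d + 1 : Nat) : Int) := by push_cast; ring
      rw [this, ih (d + 1) (by omega) (by omega)]
      congr 1
      omega
    · simp only [h, if_neg, not_false_eq_true]
      have hdn : (d : Int).toNat = d := Int.toNat_natCast d
      rw [hdn] at h
      have : n < 4 ^ d := by
        rw [not_le] at h
        exact_mod_cast h
      have := natDigits_length_le n d hd this
      congr 1
      omega

-- each dict lookup is the corresponding character
lemma dict_lookup (d : Nat) (hd : d < 4) :
    PySem.Dict.getD pvDictA (d : Int) [] = [pvChar d] := by
  interval_cases d <;> decide

-- the MSB-first digit sweep equals leading zeros ++ reversed LSB digits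
lemma digits_msb (n w : Nat) (hw : (natDigits n).length ≤ w) :
    (List.range w).map (fun j => n / 4 ^ (w - 1 - j) % 4) =
      List.replicate (w - (natDigits n).length) 0 ++ (natDigits n).reverse := by
  set L := (natDigits n).length with hL
  apply List.ext_getElem
  · simp only [List.length_map, List.length_range, List.length_append,
      List.length_replicate, List.length_reverse, ← hL]
    omega
  · intro j h1 h2
    simp only [List.length_map, List.length_range] at h1
    simp only [List.getElem_map, List.getElem_range]
    by_cases hj : j < w - L
    · rw [List.getElem_append_left (by simpa using hj)]
      simp only [List.getElem_replicate]
      have : n < 4 ^ (w - 1 - j) :=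
        lt_of_lt_of_le (natDigits_lt n) (Nat.pow_le_pow_right (by omega) (by omega))
      simp [Nat.div_eq_of_lt this]
    · rw [List.getElem_append_right (by simp only [List.length_replicate]; omega)]
      rw [List.getElem_reverse]
      rw [natDigits_getElem n _
        (by simp only [List.length_replicate, ← hL]; omega)]
      have heq : (natDigits n).length - 1 - (j - (List.replicate (w - L) (0 : Nat)).length)
          = w - 1 - j := by
        simp only [List.length_replicate, ← hL]; omega
      rw [heq]

-- A's join-of-lookups over the reversed digits is map pvChar over the reversed digits
lemma joinA (n : Nat) :
    PySem.Chars.join []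
      (((((natDigits n).map (Nat.cast : Nat → Int))).reverse).map
        (fun i => PySem.Dict.getD pvDictA i [])) =
      (natDigits n).reverse.map pvChar := by
  rw [← List.map_reverse, List.map_map]
  have hm : ((natDigits n).reverse).map ((fun i => PySem.Dict.getD pvDictA i []) ∘ (Nat.cast : Nat → Int))
      = ((natDigits n).reverse.map pvChar).map (fun c => [c]) := by
    rw [List.map_map]
    apply List.map_congr_left
    intro d hd
    have hd4 : d < 4 := natDigits_mem_lt n d (List.mem_reverse.mp hd)
    simp only [Function.comp]
    rw [dict_lookup d hd4]
  rw [hm]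
  exact PySem.Chars.join_nil_singletons _

-- ===== VERDICT (by name: the statement is the Claim_ definition above) =====
theorem trans_num_to_seq_spec : Claim_equal_trans_num_to_seq := by
  intro num seq_length _ hpre
  unfold Spec_trans_num_to_seq
  obtain ⟨n, rfl⟩ := Int.eq_ofNat_of_zero_le hpre
  set L := (natDigits n).length with hL
  have hL1 : 0 < L := natDigits_length_pos n
  have hnlt : n < 4 ^ L := natDigits_lt n
  have hLn : L ≤ n + 1 :=
    natDigits_length_le n (n + 1) (by omega)
      (lt_of_lt_of_le (Nat.lt_pow_self (by norm_num))
        (Nat.pow_le_pow_right (by norm_num) (by omega)))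
  -- the common width
  set w : Int := max seq_length (L : Int) with hwdef
  set wn : Nat := w.toNat with hwn
  have hw1 : (1 : Int) ≤ w := le_trans (by exact_mod_cast hL1) (le_max_right _ _)
  have hLwn : L ≤ wn := by omega
  -- A side
  have hA := pvLoopA_spec (n + 1) n [] (by omega)
  simp only [List.nil_append] at hA
  have hAeq : trans_num_to_seq (↑n) seq_length =
      String.ofList (List.replicate (wn - L) 'A' ++ (natDigits n).reverse.map pvChar) := by
    simp only [trans_num_to_seq, Int.toNat_natCast]
    rw [hA, joinA n]
    congr 2
    rw [PySem.List.pyRepeat_singleton]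
    congr 1
    simp only [List.length_reverse, List.length_map, ← hL]
    omega
  -- B side
  have hB : pvCountB (n + 1) (↑n) 1 = (L : Int) := by
    have h := pvCountB_spec (n + 1) n 1 (by omega) (by omega)
    simp only [Nat.cast_one] at h
    rw [h]
    exact_mod_cast congrArg (Nat.cast : Nat → Int) (show max 1 L = L by omega)
  have hBeq : trans_num_to_seq_alt (↑n) seq_length =
      String.ofList (List.replicate (wn - L) 'A' ++ (natDigits n).reverse.map pvChar) := by
    simp only [trans_num_to_seq_alt, Int.toNat_natCast]
    rw [hB, ← hwdef]
    rw [PySem.List.pyRange_neg_one]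
    have hwt : ((w - 1) - (-1)).toNat = wn := by omega
    rw [hwt, List.map_map]
    have hmap : (List.range wn).map
        ((fun k => [PySem.List.pyGetD ['A', 'C', 'G', 'T']
            (PySem.Int.band ((↑n : Int) >>> (2 * k).toNat) 3) ' ']) ∘
          (fun k : Nat => w - 1 - (k : Int))) =
        ((List.range wn).map (fun j => pvChar (n / 4 ^ (wn - 1 - j) % 4))).map (fun c => [c]) := by
      rw [List.map_map]
      apply List.map_congr_left
      intro j hj
      have hjw : j < wn := List.mem_range.mp hj
      have hkt : (2 * (w - 1 - (j : Int))).toNat = 2 * (wn - 1 - j) := by omega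
      simp only [Function.comp, hkt]
      rw [Int.shiftRight_natCast n (2 * (wn - 1 - j))]
      have h2 : PySem.Int.band ((n >>> (2 * (wn - 1 - j)) : Nat) : Int) 3
          = ((n >>> (2 * (wn - 1 - j)) &&& 3 : Nat) : Int) := by
        exact_mod_cast PySem.Int.band_natCast (n >>> (2 * (wn - 1 - j))) 3
      rw [h2, PySem.List.pyGetD_natCast]
      have h4 : n >>> (2 * (wn - 1 - j)) &&& 3 = n / 4 ^ (wn - 1 - j) % 4 := by
        rw [Nat.shiftRight_eq_div_pow]
        have h3 : (3 : Nat) = 2 ^ 2 - 1 := rfl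
        rw [h3, Nat.and_two_pow_sub_one_eq_mod, pow_mul]
        norm_num
      rw [h4]
      rfl
    rw [hmap, PySem.Chars.join_nil_singletons]
    have hfac : (fun j => pvChar (n / 4 ^ (wn - 1 - j) % 4)) =
        pvChar ∘ (fun j => n / 4 ^ (wn - 1 - j) % 4) := rfl
    rw [hfac, ← List.map_map, digits_msb n wn hLwn]
    simp only [List.map_append, List.map_replicate, ← hL]
    rfl
  rw [hAeq, hBeq]
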